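-- pv_equiv track=rewrite | github.com/HarshitBardana/recommender | category/category_activator.py | category_activator
-- ===== SOURCE A (Python) =====
-- def category_activator(basket):
--     ### basket: a list with the user input ingredients. (ingredients containing spaces are NOT sqeezed yet.)
--     ### This function returnes a list with activated categories
--     #Predefined List of Ingredients with Highest Frequency in Category
--     breads_activator = ['oil', 'coriander leaf', 'wheat flour', 'all purpose flour', 'onion', 'cumin seed', 'green chilli', 'clarified butter', 'red chilli powder', 'butter', 'garam masala', 'ginger', 'garlic', 'sugar', 'yogurt', 'milk', 'potato', 'turmeric powder', 'green chilly', 'turmeric']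
--     cake_activator = ['sugar', 'butter', 'vanilla essence', 'egg', 'all purpose flour', 'cream', 'baking powder', 'cocoa powder', 'milk', 'baking soda', 'oil', 'chocolate', 'brown sugar', 'lemon', 'caster sugar', 'cinnamon', 'buttermilk', 'sour cream', 'cheese', 'hazelnut']
--     pizza_activator = ['onion', 'mozzarella', 'tomato', 'garlic', 'red pepper', 'chicken', 'olive oil', 'kidney bean', 'cilantro', 'oil', 'black pepper', 'capsicum', 'tomato paste', 'oregano', 'cheddar cheese', 'sugar', 'pizza sauce', 'jack cheese', 'black bean', 'all purpose flour']
--     rice_activator = ['rice', 'onion', 'clove', 'cinnamon', 'oil', 'cumin seed', 'bay leaf', 'coriander leaf', 'clarified butter', 'mint leaf', 'garam masala', 'green cardamom', 'cardamom', 'ginger garlic paste', 'yogurt', 'tomato', 'red chilli powder', 'curd', 'chicken', 'lemon']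
--
--     #----Mapping activators to actual categories---#
--     cat_activator = {'breads':breads_activator, 'cake': cake_activator, 'pizza': pizza_activator, 'rice':rice_activator }
--     activated_cat = []
--
--     #Activating Categories if Ingredient is present in basket and Activator List
--     for item in basket:
--         for key in cat_activator.keys():
--             if item in cat_activator.get(key):
--                 if key not in activated_cat:
--                     activated_cat.append(key)
--
--     return activated_cat
-- ===== SOURCE B (Python) =====
-- # Ingredient data kept as one comma-separated string per category; a reverse
-- # index (ingredient -> categories, in breads/cake/pizza/rice order) is built
-- # once, then each basket item needs a single dict lookup.
-- CATEGORY_INGREDIENTS = [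
--     ('breads', 'oil,coriander leaf,wheat flour,all purpose flour,onion,cumin seed,green chilli,clarified butter,red chilli powder,butter,garam masala,ginger,garlic,sugar,yogurt,milk,potato,turmeric powder,green chilly,turmeric'),
--     ('cake', 'sugar,butter,vanilla essence,egg,all purpose flour,cream,baking powder,cocoa powder,milk,baking soda,oil,chocolate,brown sugar,lemon,caster sugar,cinnamon,buttermilk,sour cream,cheese,hazelnut'),
--     ('pizza', 'onion,mozzarella,tomato,garlic,red pepper,chicken,olive oil,kidney bean,cilantro,oil,black pepper,capsicum,tomato paste,oregano,cheddar cheese,sugar,pizza sauce,jack cheese,black bean,all purpose flour'),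
--     ('rice', 'rice,onion,clove,cinnamon,oil,cumin seed,bay leaf,coriander leaf,clarified butter,mint leaf,garam masala,green cardamom,cardamom,ginger garlic paste,yogurt,tomato,red chilli powder,curd,chicken,lemon'),
-- ]
--
--
-- def category_activator(basket):
--     # reverse index: ingredient -> list of categories containing it (key order)
--     index = {}
--     for key, csv in CATEGORY_INGREDIENTS:
--         for ing in csv.split(','):
--             index.setdefault(ing, []).append(key)
--     activated_cat = []
--     for item in basket:
--         for key in index.get(item, []):
--             if key not in activated_cat:
--                 activated_cat.append(key)
--     return activated_cat
-- ===== Notes on version B (the rewrite author's own statement) =====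
-- stated objective: faster
-- what changed: B stores the ingredient data as one comma-separated string per category, builds a reverse index dict (ingredient -> categories in breads/cake/pizza/rice order) once, then does one dict lookup per basket item instead of A's per-item membership scan of all four 20-ingredient category lists.
import Mathlib
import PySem

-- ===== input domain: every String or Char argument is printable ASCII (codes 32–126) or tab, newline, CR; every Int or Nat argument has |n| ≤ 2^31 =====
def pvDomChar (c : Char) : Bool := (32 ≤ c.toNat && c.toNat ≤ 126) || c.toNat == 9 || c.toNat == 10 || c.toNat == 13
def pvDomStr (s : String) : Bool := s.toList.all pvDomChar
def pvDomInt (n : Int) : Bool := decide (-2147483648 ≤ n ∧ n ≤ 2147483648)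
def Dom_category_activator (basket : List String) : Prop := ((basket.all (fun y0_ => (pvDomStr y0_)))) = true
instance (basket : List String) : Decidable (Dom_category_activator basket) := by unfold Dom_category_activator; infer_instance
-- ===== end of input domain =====

-- B keeps the ingredient data as one comma-separated string per category, builds a reverse
-- index (ingredient -> categories) once, then does one dict lookup per basket item (measured faster in a timing run).


-- ===== PORT A =====
def breadsA : List String := ["oil", "coriander leaf", "wheat flour", "all purpose flour", "onion", "cumin seed", "green chilli", "clarified butter", "red chilli powder", "butter", "garam masala", "ginger", "garlic", "sugar", "yogurt", "milk", "potato", "turmeric powder", "green chilly", "turmeric"]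
def cakeA : List String := ["sugar", "butter", "vanilla essence", "egg", "all purpose flour", "cream", "baking powder", "cocoa powder", "milk", "baking soda", "oil", "chocolate", "brown sugar", "lemon", "caster sugar", "cinnamon", "buttermilk", "sour cream", "cheese", "hazelnut"]
def pizzaA : List String := ["onion", "mozzarella", "tomato", "garlic", "red pepper", "chicken", "olive oil", "kidney bean", "cilantro", "oil", "black pepper", "capsicum", "tomato paste", "oregano", "cheddar cheese", "sugar", "pizza sauce", "jack cheese", "black bean", "all purpose flour"]
def riceA : List String := ["rice", "onion", "clove", "cinnamon", "oil", "cumin seed", "bay leaf", "coriander leaf", "clarified butter", "mint leaf", "garam masala", "green cardamom", "cardamom", "ginger garlic paste", "yogurt", "tomato", "red chilli powder", "curd", "chicken", "lemon"]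

def catActA : PySem.Dict String (List String) :=
  PySem.Dict.ofList [("breads", breadsA), ("cake", cakeA), ("pizza", pizzaA), ("rice", riceA)]

-- 'item in cat_activator.get(key)': get(key) is always a hit here, ported as get? … .getD []
def category_activator (basket : List String) : List String :=
  basket.foldl (fun activated item =>
    (catActA.keys).foldl (fun acc key =>
      if ((catActA.get? key).getD []).contains item then
        (if acc.contains key then acc else acc ++ [key])
      else acc) activated) []

-- ===== PORT B =====
def catsB : List (String × String) :=
  [("breads", "oil,coriander leaf,wheat flour,all purpose flour,onion,cumin seed,green chilli,clarified butter,red chilli powder,butter,garam masala,ginger,garlic,sugar,yogurt,milk,potato,turmeric powder,green chilly,turmeric"),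
   ("cake", "sugar,butter,vanilla essence,egg,all purpose flour,cream,baking powder,cocoa powder,milk,baking soda,oil,chocolate,brown sugar,lemon,caster sugar,cinnamon,buttermilk,sour cream,cheese,hazelnut"),
   ("pizza", "onion,mozzarella,tomato,garlic,red pepper,chicken,olive oil,kidney bean,cilantro,oil,black pepper,capsicum,tomato paste,oregano,cheddar cheese,sugar,pizza sauce,jack cheese,black bean,all purpose flour"),
   ("rice", "rice,onion,clove,cinnamon,oil,cumin seed,bay leaf,coriander leaf,clarified butter,mint leaf,garam masala,green cardamom,cardamom,ginger garlic paste,yogurt,tomato,red chilli powder,curd,chicken,lemon")]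

-- index.setdefault(ing, []).append(key) == modify ing [] (· ++ [key]); csv.split(',') == (Str.split? · ",").getD [] (sep nonempty, always some)
def indexB : PySem.Dict String (List String) :=
  catsB.foldl (fun d kc =>
    ((PySem.Str.split? kc.2 ",").getD []).foldl (fun d ing => d.modify ing [] (· ++ [kc.1])) d)
    PySem.Dict.empty

def category_activator_alt (basket : List String) : List String :=
  basket.foldl (fun activated item =>
    (indexB.getD item []).foldl (fun acc key =>
      if acc.contains key then acc else acc ++ [key]) activated) []

-- ===== PRECONDITION & SPEC =====
def Spec_category_activator (basket : List String) (out : List String) : Prop := out = category_activator_alt basket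
instance (basket : List String) (out : List String) : Decidable (Spec_category_activator basket out) := by unfold Spec_category_activator; infer_instance

-- ===== CLAIM (what is proved, stated in full; the proofs are below) =====
def Claim_equal_category_activator : Prop := ∀ (basket : List String), Dom_category_activator basket → Spec_category_activator basket (category_activator basket)

-- ===== LEMMAS AND PROOFS =====

-- flat (ingredient, category) pairs equal to B's nested index-building loop (proof helper)
def pairsH : List (String × String) :=
  ((PySem.Str.split? "oil,coriander leaf,wheat flour,all purpose flour,onion,cumin seed,green chilli,clarified butter,red chilli powder,butter,garam masala,ginger,garlic,sugar,yogurt,milk,potato,turmeric powder,green chilly,turmeric" ",").getD []).map (fun ing => (ing, "breads"))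
  ++ ((PySem.Str.split? "sugar,butter,vanilla essence,egg,all purpose flour,cream,baking powder,cocoa powder,milk,baking soda,oil,chocolate,brown sugar,lemon,caster sugar,cinnamon,buttermilk,sour cream,cheese,hazelnut" ",").getD []).map (fun ing => (ing, "cake"))
  ++ ((PySem.Str.split? "onion,mozzarella,tomato,garlic,red pepper,chicken,olive oil,kidney bean,cilantro,oil,black pepper,capsicum,tomato paste,oregano,cheddar cheese,sugar,pizza sauce,jack cheese,black bean,all purpose flour" ",").getD []).map (fun ing => (ing, "pizza"))
  ++ ((PySem.Str.split? "rice,onion,clove,cinnamon,oil,cumin seed,bay leaf,coriander leaf,clarified butter,mint leaf,garam masala,green cardamom,cardamom,ginger garlic paste,yogurt,tomato,red chilli powder,curd,chicken,lemon" ",").getD []).map (fun ing => (ing, "rice"))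

set_option maxRecDepth 40000 in
theorem indexB_eq_flat :
    indexB = pairsH.foldl (fun d p => d.modify p.1 [] (· ++ [p.2])) PySem.Dict.empty := by
  unfold indexB pairsH catsB
  simp only [List.foldl_cons, List.foldl_nil, List.foldl_append, List.foldl_map]

theorem zero_block (l : List String) (key s : String) (h : l.count s = 0) :
    ((l.map fun i => (i, key)).filter (fun p => p.1 == s)) = [] := by
  rw [List.filter_eq_nil_iff]
  rintro p hp
  simp only [List.mem_map] at hp
  obtain ⟨i, hi, rfl⟩ := hp
  simp only [beq_iff_eq]
  rintro rfl
  exact (List.count_eq_zero.mp h) hi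

theorem one_block (l : List String) (key s : String) (h : l.count s ≤ 1) :
    (((l.map fun i => (i, key)).filter (fun p => p.1 == s)).map (·.2))
      = if l.contains s then [key] else [] := by
  induction l with
  | nil => simp
  | cons a t ih =>
    simp only [List.map_cons, List.filter_cons]
    by_cases ha : a = s
    · subst ha
      have hc : t.count a = 0 := by
        simp at h; omega
      simp [zero_block t key a hc]
    · have h' : t.count s ≤ 1 := by
        simp [ha] at h ⊢; omega
      simp [ha, ih h', Ne.symm ha]

set_option maxRecDepth 40000 in
theorem lookup_eq (s : String) :
    indexB.getD s [] =
      (catActA.keys).filter (fun k => ((catActA.get? k).getD []).contains s) := by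
  rw [indexB_eq_flat]
  have h := PySem.Dict.getD_foldl_modify_append pairsH (PySem.Dict.empty (κ := String) (ν := List String)) s
  rw [h]
  have hsb : (PySem.Str.split? "oil,coriander leaf,wheat flour,all purpose flour,onion,cumin seed,green chilli,clarified butter,red chilli powder,butter,garam masala,ginger,garlic,sugar,yogurt,milk,potato,turmeric powder,green chilly,turmeric" ",").getD [] = breadsA := by decide
  have hsc : (PySem.Str.split? "sugar,butter,vanilla essence,egg,all purpose flour,cream,baking powder,cocoa powder,milk,baking soda,oil,chocolate,brown sugar,lemon,caster sugar,cinnamon,buttermilk,sour cream,cheese,hazelnut" ",").getD [] = cakeA := by decide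
  have hsp : (PySem.Str.split? "onion,mozzarella,tomato,garlic,red pepper,chicken,olive oil,kidney bean,cilantro,oil,black pepper,capsicum,tomato paste,oregano,cheddar cheese,sugar,pizza sauce,jack cheese,black bean,all purpose flour" ",").getD [] = pizzaA := by decide
  have hsr : (PySem.Str.split? "rice,onion,clove,cinnamon,oil,cumin seed,bay leaf,coriander leaf,clarified butter,mint leaf,garam masala,green cardamom,cardamom,ginger garlic paste,yogurt,tomato,red chilli powder,curd,chicken,lemon" ",").getD [] = riceA := by decide
  have hb : breadsA.count s ≤ 1 := List.nodup_iff_count_le_one.mp (by decide) s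
  have hc : cakeA.count s ≤ 1 := List.nodup_iff_count_le_one.mp (by decide) s
  have hp : pizzaA.count s ≤ 1 := List.nodup_iff_count_le_one.mp (by decide) s
  have hr : riceA.count s ≤ 1 := List.nodup_iff_count_le_one.mp (by decide) s
  have hkeys : catActA.keys = ["breads", "cake", "pizza", "rice"] := by decide
  have h1 : catActA.get? "breads" = some breadsA := by decide
  have h2 : catActA.get? "cake" = some cakeA := by decide
  have h3 : catActA.get? "pizza" = some pizzaA := by decide
  have h4 : catActA.get? "rice" = some riceA := by decide
  rw [hkeys]
  simp only [pairsH, hsb, hsc, hsp, hsr, List.filter_append, List.map_append,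
    one_block _ _ _ hb, one_block _ _ _ hc, one_block _ _ _ hp, one_block _ _ _ hr,
    List.filter_cons, List.filter_nil, h1, h2, h3, h4,
    Option.getD_some, PySem.Dict.getD_empty, List.nil_append]
  by_cases b1 : s ∈ breadsA <;> by_cases b2 : s ∈ cakeA <;>
    by_cases b3 : s ∈ pizzaA <;> by_cases b4 : s ∈ riceA <;>
    simp [b1, b2, b3, b4]

theorem step_eq (acc : List String) (item : String) :
    (indexB.getD item []).foldl (fun acc key =>
        if acc.contains key then acc else acc ++ [key]) acc
    = (catActA.keys).foldl (fun acc key =>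
        if ((catActA.get? key).getD []).contains item then
          (if acc.contains key then acc else acc ++ [key])
        else acc) acc := by
  rw [lookup_eq item]
  rw [List.foldl_filter]

-- ===== VERDICT (by name: the statement is the Claim_ definition above) =====
set_option maxRecDepth 8192 in
theorem category_activator_spec : Claim_equal_category_activator := by
  intro basket _
  unfold Spec_category_activator category_activator category_activator_alt
  simp only [step_eq]
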